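-- pv_equiv track=rewrite | github.com/MrGuru-VK/Halleyx_project1 | app.py | list_latest_workflows
-- ===== SOURCE A (Python) =====
-- def list_latest_workflows(db, search="", page=1, per_page=10):
--     latest = {}
--     for workflow in db["workflows"]:
--         key = workflow["workflow_key"]
--         current = latest.get(key)
--         if not current or workflow["version"] > current["version"]:
--             latest[key] = workflow
--
--     items = list(latest.values())
--     if search:
--         search_lower = search.lower()
--         items = [
--             workflow
--             for workflow in items
--             if search_lower in workflow["name"].lower() or search_lower in workflow["id"].lower()
--         ]
--
--     items.sort(key=lambda workflow: workflow["updated_at"], reverse=True)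
--     total = len(items)
--     start = max(page - 1, 0) * per_page
--     end = start + per_page
--     return items[start:end], total
-- ===== SOURCE B (Python) =====
-- def list_latest_workflows(db, search="", page=1, per_page=10):
--     # Two-phase: first index all workflows by key, then reduce each group to
--     # its latest version (strict '>', so the first maximal element wins).
--     groups = {}
--     for workflow in db["workflows"]:
--         key = workflow["workflow_key"]
--         groups[key] = groups.get(key, []) + [workflow]
--     items = []
--     for group in groups.values():
--         best = group[0]
--         for w in group[1:]:
--             if w["version"] > best["version"]:
--                 best = w
--         items.append(best)
--     if search:
--         s = search.lower()
--         items = [w for w in items if s in w["name"].lower() or s in w["id"].lower()]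
--     items.sort(key=lambda w: w["updated_at"], reverse=True)
--     total = len(items)
--     start = max(page - 1, 0) * per_page
--     return items[start:start + per_page], total
-- ===== Notes on version B (the rewrite author's own statement) =====
-- stated objective: alternative
-- what changed: Replaces A's single streaming keep-if-strictly-greater running-max dict with a two-phase decomposition: first index every workflow into a dict of per-key groups, then reduce each group from its first element with the strict '>' comparison (first maximal wins, matching A's tie-breaking); filter, sort and pagination are unchanged.
import Mathlib
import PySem

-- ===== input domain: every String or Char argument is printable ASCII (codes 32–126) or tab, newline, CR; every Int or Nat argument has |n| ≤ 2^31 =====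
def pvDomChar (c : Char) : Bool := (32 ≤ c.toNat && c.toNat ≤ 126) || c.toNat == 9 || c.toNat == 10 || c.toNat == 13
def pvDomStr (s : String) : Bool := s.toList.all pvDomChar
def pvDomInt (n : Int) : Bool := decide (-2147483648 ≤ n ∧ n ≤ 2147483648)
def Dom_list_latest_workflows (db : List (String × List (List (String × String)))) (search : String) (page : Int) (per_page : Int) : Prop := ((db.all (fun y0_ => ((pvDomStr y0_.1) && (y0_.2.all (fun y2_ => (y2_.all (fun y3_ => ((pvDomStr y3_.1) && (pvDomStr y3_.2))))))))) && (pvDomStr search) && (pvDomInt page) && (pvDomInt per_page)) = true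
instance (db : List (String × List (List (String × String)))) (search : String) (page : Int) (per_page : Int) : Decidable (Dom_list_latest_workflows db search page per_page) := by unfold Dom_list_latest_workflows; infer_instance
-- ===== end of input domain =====

-- B replaces A's streaming keep-if-strictly-greater running-max dict by a group-by-key
-- index followed by a per-group reduce from the first element (objective: alternative
-- decomposition, same cost); the filter / sort / pagination code is verbatim shared.

abbrev pvW : Type := List (String × String)  -- a workflow dict

-- shared helper: w[k] as an assoc-list (dict) lookup; "" is never read under Pre_
def pvGetS (w : List (String × String)) (k : String) : String :=
  (PySem.Dict.mk w).getD k ""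

-- shared tail of BOTH Pythons (their filter / sort / paginate code is verbatim identical)
def pvTail (items0 : List (List (String × String))) (search : String) (page : Int) (per_page : Int) :
    (List (List (String × String))) × Int :=
  let items1 :=
    if search ≠ "" then
      items0.filter (fun w =>
        PySem.Str.isIn (PySem.Str.lower search) (PySem.Str.lower (pvGetS w "name"))
        || PySem.Str.isIn (PySem.Str.lower search) (PySem.Str.lower (pvGetS w "id")))
    else items0
  let items := PySem.List.sorted items1 (fun w => pvGetS w "updated_at") true
  let total : Int := items.length
  let start := max (page - 1) 0 * per_page
  (PySem.List.slice items (some start) (some (start + per_page)), total)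

-- ===== PORT A =====
def list_latest_workflows (db : List (String × List (List (String × String)))) (search : String) (page : Int) (per_page : Int) : (List (List (String × String))) × Int :=
  let workflows := (PySem.Dict.mk db).getD "workflows" []
  let latest := workflows.foldl (fun latest w =>
    let key := pvGetS w "workflow_key"
    match latest.get? key with
    | none => latest.insert key w
    | some current =>
      if current.isEmpty || decide (pvGetS current "version" < pvGetS w "version") then
        latest.insert key w
      else latest) PySem.Dict.empty
  pvTail latest.values search page per_page

-- ===== PORT B =====
-- B's inner loop: best = group[0]; for w in group[1:]: if w["version"] > best["version"]: best = w
-- (the [] branch is Python's IndexError on group[0]; groups are never empty)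
def pvRed (group : List pvW) : pvW :=
  match group with
  | [] => []
  | best :: rest =>
    rest.foldl (fun best w =>
      if decide (pvGetS best "version" < pvGetS w "version") then w else best) best

def list_latest_workflows_alt (db : List (String × List (List (String × String)))) (search : String) (page : Int) (per_page : Int) : (List (List (String × String))) × Int :=
  let workflows := (PySem.Dict.mk db).getD "workflows" []
  let groups := workflows.foldl (fun g w =>
    let key := pvGetS w "workflow_key"
    g.insert key (g.getD key [] ++ [w])) PySem.Dict.empty
  let items := groups.values.foldl (fun items group => items ++ [pvRed group]) []
  pvTail items search page per_page

-- ===== PRECONDITION & SPEC =====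
-- Pre_ keeps the dict-shaped inputs both programs return on: db has a "workflows" list,
-- every workflow has "workflow_key" (else both raise KeyError), "version" is required
-- only for workflows whose key occurs more than once (only those are ever compared),
-- and "updated_at" (plus "name"/"id" when search is nonempty) is required on every
-- workflow although A and B only read it on each group's surviving winner — Pre_ is
-- slightly narrower than A's true domain there (see claim cites).
def Pre_list_latest_workflows (db : List (String × List (List (String × String)))) (search : String) (page : Int) (per_page : Int) : Prop :=
  (PySem.Dict.mk db).contains "workflows" = true ∧
  ∀ w ∈ (PySem.Dict.mk db).getD "workflows" [],
    (PySem.Dict.mk w).contains "workflow_key" = true ∧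
    (2 ≤ ((PySem.Dict.mk db).getD "workflows" []).countP
        (fun w' => pvGetS w' "workflow_key" == pvGetS w "workflow_key") →
      (PySem.Dict.mk w).contains "version" = true) ∧
    (PySem.Dict.mk w).contains "updated_at" = true ∧
    (search ≠ "" → (PySem.Dict.mk w).contains "name" = true ∧ (PySem.Dict.mk w).contains "id" = true)
instance (db : List (String × List (List (String × String)))) (search : String) (page : Int) (per_page : Int) : Decidable (Pre_list_latest_workflows db search page per_page) := by unfold Pre_list_latest_workflows; infer_instance

def pvWitness_list_latest_workflows : (List (String × List (List (String × String)))) × String × Int × Int :=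
  ([("workflows", [[("workflow_key", "k"), ("version", "1"), ("updated_at", "2024-01-01"), ("name", "n"), ("id", "i")]])], "", 1, 10)

def Spec_list_latest_workflows (db : List (String × List (List (String × String)))) (search : String) (page : Int) (per_page : Int) (out : (List (List (String × String))) × Int) : Prop := out = list_latest_workflows_alt db search page per_page
instance (db : List (String × List (List (String × String)))) (search : String) (page : Int) (per_page : Int) (out : (List (List (String × String))) × Int) : Decidable (Spec_list_latest_workflows db search page per_page out) := by unfold Spec_list_latest_workflows; infer_instance

-- ===== CLAIM (what is proved, stated in full; the proofs are below) =====
def Claim_equal_list_latest_workflows : Prop := ∀ (db : List (String × List (List (String × String)))) (search : String) (page : Int) (per_page : Int), Dom_list_latest_workflows db search page per_page → Pre_list_latest_workflows db search page per_page → Spec_list_latest_workflows db search page per_page (list_latest_workflows db search page per_page)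

-- ===== LEMMAS AND PROOFS =====
-- abbreviations for the two loop bodies
def pvStepA (latest : PySem.Dict String pvW) (w : pvW) : PySem.Dict String pvW :=
  match latest.get? (pvGetS w "workflow_key") with
  | none => latest.insert (pvGetS w "workflow_key") w
  | some current =>
    if current.isEmpty || decide (pvGetS current "version" < pvGetS w "version") then
      latest.insert (pvGetS w "workflow_key") w
    else latest

def pvStepB (g : PySem.Dict String (List pvW)) (w : pvW) : PySem.Dict String (List pvW) :=
  g.insert (pvGetS w "workflow_key") (g.getD (pvGetS w "workflow_key") [] ++ [w])

def pvMapD (d : PySem.Dict String (List pvW)) : PySem.Dict String pvW :=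
  PySem.Dict.mk (d.items.map (fun p => (p.1, pvRed p.2)))

def pvInv (d : PySem.Dict String (List pvW)) : Prop :=
  (PySem.Dict.keys d).Nodup ∧ ∀ p ∈ d.items, ∀ x ∈ p.2, x ≠ ([] : pvW)

lemma pvGet?_mapD (d : PySem.Dict String (List pvW)) (k : String) :
    (pvMapD d).get? k = (d.get? k).map pvRed := by
  simp only [pvMapD, PySem.Dict.get?, List.find?_map, Function.comp_def]
  cases List.find? (fun p => p.1 == k) d.items <;> rfl

lemma pvContains_mapD (d : PySem.Dict String (List pvW)) (k : String) :
    (pvMapD d).contains k = d.contains k := by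
  simp [pvMapD, PySem.Dict.contains, List.any_map, Function.comp_def]

lemma pvRed_cons_append (b : pvW) (t : List pvW) (w : pvW) :
    pvRed ((b :: t) ++ [w]) =
      if pvGetS (pvRed (b :: t)) "version" < pvGetS w "version" then w else pvRed (b :: t) := by
  simp only [pvRed, List.cons_append]
  rw [List.foldl_append]
  simp only [List.foldl_cons, List.foldl_nil, decide_eq_true_eq]

lemma pvFoldl_mem (t : List pvW) : ∀ b : pvW,
    t.foldl (fun best w => if decide (pvGetS best "version" < pvGetS w "version") then w else best) b ∈ b :: t := by
  induction t with
  | nil => intro b; exact List.mem_singleton.2 rfl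
  | cons x t ih =>
    intro b
    simp only [List.foldl_cons]
    rcases List.mem_cons.1 (ih (if decide (pvGetS b "version" < pvGetS x "version") then x else b)) with h | h
    · rw [h]
      split_ifs <;> simp
    · exact List.mem_cons_of_mem _ (List.mem_cons_of_mem _ h)

lemma pvRed_mem (b : pvW) (t : List pvW) : pvRed (b :: t) ∈ b :: t := by
  unfold pvRed
  exact pvFoldl_mem t b

lemma pvInsert_mapD (d : PySem.Dict String (List pvW)) (k : String) (gv : List pvW) :
    (pvMapD d).insert k (pvRed gv) = pvMapD (d.insert k gv) := by
  apply PySem.Dict.ext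
  cases hc : d.contains k with
  | false =>
    have hcm : (pvMapD d).contains k = false := by rw [pvContains_mapD, hc]
    have h2 : d.insert k gv = PySem.Dict.mk (d.items ++ [(k, gv)]) :=
      PySem.Dict.ext (PySem.Dict.items_insert_of_not_contains _ _ hc)
    rw [PySem.Dict.items_insert_of_not_contains _ _ hcm, h2]
    simp [pvMapD]
  | true =>
    have hcm : (pvMapD d).contains k = true := by rw [pvContains_mapD, hc]
    have h2 : d.insert k gv =
        PySem.Dict.mk (List.map (fun p => if (p.1 == k) = true then (k, gv) else p) d.items) :=
      PySem.Dict.ext (PySem.Dict.items_insert_of_contains _ _ hc)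
    rw [PySem.Dict.items_insert_of_contains _ _ hcm, h2]
    simp only [pvMapD, List.map_map]
    apply List.map_congr_left
    intro p _
    by_cases hpk : p.1 = k <;> simp [hpk]

lemma pvMapD_insert_same (d : PySem.Dict String (List pvW)) (k : String) (g gv : List pvW)
    (hnd : (PySem.Dict.keys d).Nodup) (hg : d.get? k = some g) (hval : pvRed gv = pvRed g) :
    pvMapD (d.insert k gv) = pvMapD d := by
  apply PySem.Dict.ext
  have hc : d.contains k = true := by rw [PySem.Dict.contains_eq_isSome_get?, hg]; rfl
  have h2 : d.insert k gv =
      PySem.Dict.mk (List.map (fun p => if (p.1 == k) = true then (k, gv) else p) d.items) :=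
    PySem.Dict.ext (PySem.Dict.items_insert_of_contains _ _ hc)
  rw [h2]
  simp only [pvMapD, List.map_map]
  apply List.map_congr_left
  intro p hp
  by_cases hpk : p.1 = k
  · have hpg : p.2 = g := by
      have hmem : (p.1, p.2) ∈ d.items := by simpa using hp
      have := PySem.Dict.get?_of_mem_items d hmem hnd
      rw [hpk, hg] at this
      exact (Option.some.inj this).symm
    simp [hpk, hval, hpg]
  · simp [hpk]

lemma pvStep_comm (d : PySem.Dict String (List pvW)) (w : pvW) (hInv : pvInv d) :
    pvStepA (pvMapD d) w = pvMapD (pvStepB d w) := by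
  unfold pvStepA pvStepB
  cases hg : d.get? (pvGetS w "workflow_key") with
  | none =>
    have hgd : d.getD (pvGetS w "workflow_key") [] = [] := by
      rw [PySem.Dict.getD_eq_get?_getD, hg]; rfl
    rw [pvGet?_mapD, hg, hgd]
    have h := pvInsert_mapD d (pvGetS w "workflow_key") ([] ++ [w])
    have hred : pvRed ([] ++ [w]) = w := rfl
    rw [hred] at h
    simpa using h
  | some g =>
    have hgd : d.getD (pvGetS w "workflow_key") [] = g := by
      rw [PySem.Dict.getD_eq_get?_getD, hg]; rfl
    rw [pvGet?_mapD, hg, hgd]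
    simp only [Option.map_some]
    cases g with
    | nil =>
      have hred : pvRed ([] ++ [w]) = w := rfl
      have h := pvInsert_mapD d (pvGetS w "workflow_key") ([] ++ [w])
      rw [hred] at h
      simpa [pvRed] using h
    | cons b t =>
      have hmne : pvRed (b :: t) ≠ [] := by
        have hmem : (pvGetS w "workflow_key", b :: t) ∈ d.items :=
          PySem.Dict.mem_items_of_get?_eq_some d hg
        exact hInv.2 _ hmem _ (pvRed_mem b t)
      have hemp : (pvRed (b :: t)).isEmpty = false := by
        cases hrb : pvRed (b :: t) with
        | nil => exact absurd hrb hmne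
        | cons a l => rfl
      rw [hemp]
      by_cases hlt : pvGetS (pvRed (b :: t)) "version" < pvGetS w "version"
      · have hred : pvRed ((b :: t) ++ [w]) = w := by
          rw [pvRed_cons_append, if_pos hlt]
        have h := pvInsert_mapD d (pvGetS w "workflow_key") ((b :: t) ++ [w])
        rw [hred] at h
        simpa [hlt] using h
      · have hred : pvRed ((b :: t) ++ [w]) = pvRed (b :: t) := by
          rw [pvRed_cons_append, if_neg hlt]
        have h := pvMapD_insert_same d (pvGetS w "workflow_key") (b :: t) ((b :: t) ++ [w])
          hInv.1 hg hred
        simpa [hlt] using h.symm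

lemma pvInv_step (d : PySem.Dict String (List pvW)) (w : pvW) (hInv : pvInv d) (hw : w ≠ []) :
    pvInv (pvStepB d w) := by
  unfold pvStepB
  constructor
  · exact PySem.Dict.nodup_keys_insert _ _ _ hInv.1
  · intro p hp x hx
    rcases (PySem.Dict.mem_items_insert _ _ _ p).1 hp with h | ⟨hpd, _⟩
    · rw [h] at hx
      simp only at hx
      rcases List.mem_append.1 hx with hx1 | hx2
      · cases hg : d.get? (pvGetS w "workflow_key") with
        | none =>
          rw [PySem.Dict.getD_eq_get?_getD, hg] at hx1
          simp at hx1
        | some g =>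
          rw [PySem.Dict.getD_eq_get?_getD, hg] at hx1
          exact hInv.2 _ (PySem.Dict.mem_items_of_get?_eq_some d hg) x hx1
      · rw [List.mem_singleton.1 hx2]; exact hw
    · exact hInv.2 p hpd x hx

lemma pvMain (ws : List pvW) :
    ∀ d : PySem.Dict String (List pvW), pvInv d → (∀ w ∈ ws, w ≠ []) →
      ws.foldl pvStepA (pvMapD d) = pvMapD (ws.foldl pvStepB d) := by
  induction ws with
  | nil => intro d _ _; rfl
  | cons w ws ih =>
    intro d hInv hws
    have hw : w ≠ [] := hws w (by simp)
    simp only [List.foldl_cons]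
    rw [pvStep_comm d w hInv]
    exact ih _ (pvInv_step d w hInv hw) (fun x hx => hws x (by simp [hx]))

lemma pvValues_mapD (d : PySem.Dict String (List pvW)) :
    (pvMapD d).values = d.values.map pvRed := by
  simp [pvMapD, PySem.Dict.values, List.map_map, Function.comp_def]

-- ===== VERDICT (by name: the statement is the Claim_ definition above) =====
theorem list_latest_workflows_spec : Claim_equal_list_latest_workflows := by
  intro db search page per_page _ hPre
  unfold Spec_list_latest_workflows list_latest_workflows list_latest_workflows_alt
  have hne : ∀ w ∈ (PySem.Dict.mk db).getD "workflows" [], w ≠ ([] : pvW) := by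
    intro w hw hnil
    have h := (hPre.2 w hw).1
    rw [hnil] at h
    simp [PySem.Dict.contains] at h
  have hinv : pvInv PySem.Dict.empty := by
    constructor
    · simp [PySem.Dict.keys, PySem.Dict.empty]
    · intro p hp; simp [PySem.Dict.empty] at hp
  have hmap : pvMapD PySem.Dict.empty = PySem.Dict.empty := rfl
  have h := pvMain ((PySem.Dict.mk db).getD "workflows" []) PySem.Dict.empty hinv hne
  rw [hmap] at h
  show pvTail (((PySem.Dict.mk db).getD "workflows" []).foldl pvStepA PySem.Dict.empty).values search page per_page
      = pvTail ((((PySem.Dict.mk db).getD "workflows" []).foldl pvStepB PySem.Dict.empty).values.foldl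
          (fun items group => items ++ [pvRed group]) []) search page per_page
  rw [h, pvValues_mapD, PySem.List.foldl_append_singleton_eq_map]
  rfl
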